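-- pv_equiv track=rewrite | github.com/Forlaie/DMOJ_Python | CCC '11 J3 - Sumac Sequences.py | sumac_sequence
-- ===== SOURCE A (Python) =====
-- def sumac_sequence(pnum, num, count):
--     nnum = pnum - num
--     pnum = num
--     num = nnum
--     if pnum >= num:
--         count += 1
--     else:
--         return count
--     return sumac_sequence(pnum, num, count)
-- ===== SOURCE B (Python) =====
-- def sumac_sequence(pnum, num, count):
--     # iterative form of the tail recursion
--     while True:
--         pnum, num = num, pnum - num
--         if pnum >= num:
--             count += 1
--         else:
--             return count
-- ===== Notes on version B (the rewrite author's own statement) =====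
-- stated objective: idiomatic
-- what changed: Replaced the tail-recursive self-call with an iterative while-True loop that updates (pnum, num, count) in place.
-- outside the precondition, e.g. on sumac_sequence(0, 0, 0): A raises RecursionError, B does not finish within the time limit
import Mathlib
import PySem

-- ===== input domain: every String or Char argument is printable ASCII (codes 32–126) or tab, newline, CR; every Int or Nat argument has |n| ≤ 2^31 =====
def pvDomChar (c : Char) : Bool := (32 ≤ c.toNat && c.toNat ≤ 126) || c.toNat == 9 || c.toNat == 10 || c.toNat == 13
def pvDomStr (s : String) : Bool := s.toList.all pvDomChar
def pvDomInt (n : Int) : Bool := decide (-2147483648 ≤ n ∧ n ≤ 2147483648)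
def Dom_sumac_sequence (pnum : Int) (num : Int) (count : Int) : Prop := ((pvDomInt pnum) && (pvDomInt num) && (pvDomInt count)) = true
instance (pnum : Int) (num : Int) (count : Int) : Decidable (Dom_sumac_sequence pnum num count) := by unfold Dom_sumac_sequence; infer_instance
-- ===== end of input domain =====

-- B replaces A's tail-recursive self-call with an iterative while-True loop over the
-- state (pnum, num, count); same values, O(1) stack (objective: idiomatic).

-- ===== PORT A =====
-- A's recursion diverges only at (0, 0): termination in Lean is by fuel; 500 steps cover
-- every terminating run on Dom (depth ≤ ~46 for |n| ≤ 2^31), so the fuel-out branch is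
-- never reached inside Pre_.
def sumacA : Nat → Int → Int → Int → Int
  | 0, _, _, count => count
  | fuel + 1, pnum, num, count =>
    let nnum := pnum - num
    let pnum' := num
    let num' := nnum
    if pnum' ≥ num' then
      sumacA fuel pnum' num' (count + 1)
    else
      count

def sumac_sequence (pnum : Int) (num : Int) (count : Int) : Int :=
  sumacA 500 pnum num count

-- ===== PORT B =====
-- one iteration of Source B's while-True body: either the final answer or the next state
def sumacStep (st : Int × Int × Int) : Sum Int (Int × Int × Int) :=
  let st' := (st.2.1, st.1 - st.2.1, st.2.2)
  if st'.1 ≥ st'.2.1 then Sum.inr (st'.1, st'.2.1, st'.2.2 + 1) else Sum.inl st'.2.2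

def sumacLoop : Nat → Int × Int × Int → Int
  | 0, st => st.2.2
  | fuel + 1, st =>
    match sumacStep st with
    | Sum.inl r => r
    | Sum.inr st' => sumacLoop fuel st'

def sumac_sequence_alt (pnum : Int) (num : Int) (count : Int) : Int :=
  sumacLoop 500 (pnum, num, count)

-- ===== PRECONDITION & SPEC =====
-- Pre_ excludes exactly (pnum, num) = (0, 0), the one input on which Python A recurses
-- forever and dies with RecursionError (B's loop diverges there too).
def Pre_sumac_sequence (pnum : Int) (num : Int) (count : Int) : Prop :=
  ¬ (pnum = 0 ∧ num = 0)
instance (pnum : Int) (num : Int) (count : Int) : Decidable (Pre_sumac_sequence pnum num count) := by unfold Pre_sumac_sequence; infer_instance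

def pvWitness_sumac_sequence : Int × Int × Int := (8, 5, 1)

def Spec_sumac_sequence (pnum : Int) (num : Int) (count : Int) (out : Int) : Prop := out = sumac_sequence_alt pnum num count
instance (pnum : Int) (num : Int) (count : Int) (out : Int) : Decidable (Spec_sumac_sequence pnum num count out) := by unfold Spec_sumac_sequence; infer_instance

-- ===== CLAIM (what is proved, stated in full; the proofs are below) =====
def Claim_equal_sumac_sequence : Prop := ∀ (pnum : Int) (num : Int) (count : Int), Dom_sumac_sequence pnum num count → Pre_sumac_sequence pnum num count → Spec_sumac_sequence pnum num count (sumac_sequence pnum num count)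

-- ===== LEMMAS AND PROOFS =====
-- the fueled recursion and the fueled loop compute the same value step for step
theorem sumacA_eq_sumacLoop (fuel : Nat) (pnum num count : Int) :
    sumacA fuel pnum num count = sumacLoop fuel (pnum, num, count) := by
  induction fuel generalizing pnum num count with
  | zero => rfl
  | succ f ih =>
    simp only [sumacA, sumacLoop, sumacStep]
    split_ifs with h
    · simpa using ih num (pnum - num) (count + 1)
    · rfl

-- ===== VERDICT (by name: the statement is the Claim_ definition above) =====
theorem sumac_sequence_spec : Claim_equal_sumac_sequence := by
  intro pnum num count _ _
  unfold Spec_sumac_sequence sumac_sequence sumac_sequence_alt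
  exact sumacA_eq_sumacLoop 500 pnum num count
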